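-- pv_equiv track=rewrite | github.com/danielhuf/INF1025 | Aula_13.py | contc
-- ===== SOURCE A (Python) =====
-- def contc(s,k):
--     string=s[k:]
--     if not string:
--         return 0
--     else:
--         if string[0]=='c':
--             return 1+contc(string[1:],0)
--         else:
--             return contc(string[1:],0)
-- ===== SOURCE B (Python) =====
-- def contc(s, k):
--     sub = s[k:]
--     count = 0
--     for ch in sub:
--         if ch == 'c':
--             count += 1
--     return count
-- ===== Notes on version B (the rewrite author's own statement) =====
-- stated objective: faster
-- what changed: Replaces the linear tail recursion that re-slices the string on every call with a single iterative pass over the suffix taken once, maintaining a counter.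
import Mathlib
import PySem

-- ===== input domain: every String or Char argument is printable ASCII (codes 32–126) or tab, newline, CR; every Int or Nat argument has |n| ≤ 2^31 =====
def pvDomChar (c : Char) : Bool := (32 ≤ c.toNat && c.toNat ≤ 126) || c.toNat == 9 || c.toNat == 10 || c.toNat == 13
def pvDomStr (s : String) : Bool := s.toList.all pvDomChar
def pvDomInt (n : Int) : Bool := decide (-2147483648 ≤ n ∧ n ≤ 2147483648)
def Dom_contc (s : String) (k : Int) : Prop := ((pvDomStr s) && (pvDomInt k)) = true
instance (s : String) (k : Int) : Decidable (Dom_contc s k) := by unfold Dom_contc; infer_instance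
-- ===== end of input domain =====

-- ===== PORT A =====
def contcGo : List Char → Int
  | [] => 0
  | c :: rest => if c = 'c' then 1 + contcGo rest else contcGo rest

-- A: string = s[k:]; empty → 0; else branch on string[0] == 'c' and recurse on string[1:]
-- (the recursive call's inner slice [0:] is the identity; the match on c :: rest is string[0]/string[1:])
def contc (s : String) (k : Int) : Int :=
  contcGo (PySem.List.slice s.toList (some k) none)

-- ===== PORT B =====
-- B: take the suffix once, then one fold pass with a counter
def contc_alt (s : String) (k : Int) : Int :=
  let sub := PySem.List.slice s.toList (some k) none
  sub.foldl (fun count ch => if ch = 'c' then count + 1 else count) 0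

-- ===== PRECONDITION & SPEC =====
def Spec_contc (s : String) (k : Int) (out : Int) : Prop := out = contc_alt s k
instance (s : String) (k : Int) (out : Int) : Decidable (Spec_contc s k out) := by unfold Spec_contc; infer_instance

-- ===== CLAIM (what is proved, stated in full; the proofs are below) =====
def Claim_equal_contc : Prop := ∀ (s : String) (k : Int), Dom_contc s k → Spec_contc s k (contc s k)

-- ===== LEMMAS AND PROOFS =====

-- ===== VERDICT (by name: the statement is the Claim_ definition above) =====
theorem foldl_count_eq (l : List Char) (acc : Int) :
    l.foldl (fun count ch => if ch = 'c' then count + 1 else count) acc = acc + contcGo l := by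
  induction l generalizing acc with
  | nil => simp [contcGo]
  | cons c rest ih =>
    simp only [List.foldl, contcGo]
    split <;> rw [ih] <;> ring

theorem contc_spec : Claim_equal_contc := by
  intro s k _
  unfold Spec_contc contc contc_alt
  simp [foldl_count_eq]
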